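-- pv_equiv track=rewrite | github.com/wordedword75049/DevOps-HW-1-2 | bostongene-avicenna-candidates-retrieval-eacca479d774/phase_taker.py | find_max_phase
-- ===== SOURCE A (Python) =====
-- def find_max_phase(phase_list):
--     found_max = ''
--     maximum = 0
--     for phase in phase_list:
--         if (phase != 'N/A') & (phase is not None) & (phase != 'CT_not_found'):
--             if (phase[len(phase) - 1] < '6') & (phase[len(phase) - 1] >= '1'):
--                 if int(phase[len(phase) - 1]) > maximum:
--                     found_max = phase
--                     maximum = int(phase[len(phase) - 1])
--         else:
--             if found_max == '':
--                 found_max = phase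
--     return found_max
-- ===== SOURCE B (Python) =====
-- def find_max_phase(phase_list):
--     candidates = [p for p in phase_list
--                   if p is not None and p != 'N/A' and p != 'CT_not_found'
--                   and '1' <= p[-1] <= '5']
--     if candidates:
--         return max(candidates, key=lambda p: int(p[-1]))
--     for p in phase_list:
--         if p is None or p == 'N/A' or p == 'CT_not_found':
--             return p
--     return ''
-- ===== Notes on version B (the rewrite author's own statement) =====
-- stated objective: simpler
-- what changed: A's single interleaved pass with found_max doubling as best-so-far and sentinel placeholder is replaced by two separate passes: a candidate comprehension plus max(key=int(p[-1])) for the first maximal-digit phase, with a fallback scan for the first None/'N/A'/'CT_not_found' sentinel (else '') only when no candidate exists.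
import Mathlib
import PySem

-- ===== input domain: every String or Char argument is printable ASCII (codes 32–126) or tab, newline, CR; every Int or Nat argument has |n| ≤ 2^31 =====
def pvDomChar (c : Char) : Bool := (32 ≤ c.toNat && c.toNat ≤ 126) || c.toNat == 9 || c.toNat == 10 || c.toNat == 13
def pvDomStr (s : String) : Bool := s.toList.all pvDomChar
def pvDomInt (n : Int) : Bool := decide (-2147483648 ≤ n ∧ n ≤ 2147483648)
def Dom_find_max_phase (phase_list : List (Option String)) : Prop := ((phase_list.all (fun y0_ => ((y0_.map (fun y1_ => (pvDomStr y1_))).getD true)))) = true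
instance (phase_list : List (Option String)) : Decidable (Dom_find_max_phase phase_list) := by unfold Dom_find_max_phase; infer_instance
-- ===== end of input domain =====

-- B replaces A's single interleaved pass (found_max doubling as best-so-far and sentinel
-- placeholder) with two separate passes: max() over the candidate list, else first sentinel.
-- Objective: simpler.


-- int(str(c)) for a digit char; exact here since both programs guard '1' ≤ c ≤ '5' first
def pyDigit (c : Char) : Int := (c.toNat : Int) - 48

-- ===== PORT A =====
-- the body of A's for-loop, verbatim
def aStep (st : Option String × Int) (phase : Option String) : Option String × Int :=
  if phase ≠ some "N/A" ∧ phase ≠ none ∧ phase ≠ some "CT_not_found" then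
    match phase with
    | some p =>
      match PySem.Str.pyGet? p (PySem.Str.len p - 1) with
      | some c =>
        if c < '6' ∧ '1' ≤ c then
          if pyDigit c > st.2 then (some p, pyDigit c) else st
        else st
      | none => st   -- IndexError (phase = ''), excluded by Pre_
    | none => st     -- unreachable: the guard says phase is not None
  else
    if st.1 = some "" then (phase, st.2) else st

def find_max_phase (phase_list : List (Option String)) : Option String :=
  (phase_list.foldl aStep (some "", 0)).1

-- ===== PORT B =====
-- B's comprehension filter: candidates are non-sentinel strings whose last char is '1'..'5'
def pvIsCand (p : Option String) : Option String :=
  match p with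
  | none => none
  | some s =>
    match PySem.Str.pyGet? s (-1) with
    | some c => if s ≠ "N/A" ∧ s ≠ "CT_not_found" ∧ '1' ≤ c ∧ c ≤ '5' then some s else none
    | none => none   -- IndexError on s = '' in Python, excluded by Pre_

def pvKey (s : String) : Int := pyDigit ((PySem.Str.pyGet? s (-1)).getD '0')  -- int(p[-1]); getD never hit on candidates

def pvIsSent (p : Option String) : Bool := p == none || p == some "N/A" || p == some "CT_not_found"

def find_max_phase_alt (phase_list : List (Option String)) : Option String :=
  match PySem.List.max? (phase_list.filterMap pvIsCand) pvKey with
  | some best => some best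
  | none =>
    match phase_list.find? pvIsSent with
    | some p => p
    | none => some ""

-- ===== PRECONDITION & SPEC =====
-- Pre_ excludes lists containing the empty string, on which A (and B) raise IndexError at p[-1].
def Pre_find_max_phase (phase_list : List (Option String)) : Prop := some "" ∉ phase_list
instance (phase_list : List (Option String)) : Decidable (Pre_find_max_phase phase_list) := by unfold Pre_find_max_phase; infer_instance
def pvWitness_find_max_phase : List (Option String) := [some "phase 2", none, some "N/A", some "phase 4", some "abc"]

def Spec_find_max_phase (phase_list : List (Option String)) (out : Option String) : Prop := out = find_max_phase_alt phase_list
instance (phase_list : List (Option String)) (out : Option String) : Decidable (Spec_find_max_phase phase_list out) := by unfold Spec_find_max_phase; infer_instance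

-- ===== CLAIM (what is proved, stated in full; the proofs are below) =====
def Claim_equal_find_max_phase : Prop := ∀ (phase_list : List (Option String)), Dom_find_max_phase phase_list → Pre_find_max_phase phase_list → Spec_find_max_phase phase_list (find_max_phase phase_list)

-- ===== LEMMAS AND PROOFS =====

-- running "first maximum above threshold mx" over the candidate list
def fmAux : Int → List String → Option String
  | _, [] => none
  | mx, c :: cs =>
    if mx < pvKey c then
      match fmAux (pvKey c) cs with
      | some r => some r
      | none => some c
    else fmAux mx cs

theorem char_le_lt6 {c : Char} (h : c ≤ '5') : c < '6' := by
  rw [Char.le_def, UInt32.le_iff_toNat_le] at h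
  rw [Char.lt_def, UInt32.lt_iff_toNat_lt]
  have h1 : ('6').val.toNat = 54 := rfl
  have h2 : ('5').val.toNat = 53 := rfl
  omega

theorem char_lt6_le {c : Char} (h : c < '6') : c ≤ '5' := by
  rw [Char.lt_def, UInt32.lt_iff_toNat_lt] at h
  rw [Char.le_def, UInt32.le_iff_toNat_le]
  have h1 : ('6').val.toNat = 54 := rfl
  have h2 : ('5').val.toNat = 53 := rfl
  omega

theorem char_one_le_toNat {c : Char} (h : '1' ≤ c) : 49 ≤ c.toNat := by
  rw [Char.le_def, UInt32.le_iff_toNat_le] at h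
  have h1 : ('1').val.toNat = 49 := rfl
  unfold Char.toNat
  omega

theorem toList_ne_nil {s : String} (h : s ≠ "") : s.toList ≠ [] := by
  intro hl
  apply h
  have := congrArg String.ofList hl
  simpa using this

theorem pyGet?_last (s : String) :
    PySem.Str.pyGet? s (PySem.Str.len s - 1) = PySem.Str.pyGet? s (-1) := by
  simp only [PySem.Str.pyGet?, PySem.Chars.pyGet?, PySem.List.pyGet?, PySem.List.pyIdx?, PySem.Str.len]
  by_cases hnil : s.toList = []
  · simp [hnil]
  · have hn : 0 < s.toList.length := List.length_pos_iff.mpr hnil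
    rw [if_pos (by omega : (0:Int) ≤ ↑s.toList.length - 1),
        if_pos (by omega : (↑s.toList.length - 1 : Int) < ↑s.toList.length),
        if_neg (by norm_num : ¬ (0:Int) ≤ -1),
        if_pos (by omega : -(↑s.toList.length : Int) ≤ -1)]
    simp only [Option.bind_some]
    congr 1
    omega

theorem pyGet?_ne_none {s : String} (h : s ≠ "") : ∃ c, PySem.Str.pyGet? s (-1) = some c := by
  have hn : 0 < s.toList.length := List.length_pos_iff.mpr (toList_ne_nil h)
  simp only [PySem.Str.pyGet?, PySem.Chars.pyGet?, PySem.List.pyGet?, PySem.List.pyIdx?]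
  rw [if_neg (by norm_num : ¬ (0:Int) ≤ -1), if_pos (by omega : -(↑s.toList.length : Int) ≤ -1)]
  simp only [Option.bind_some]
  exact ⟨_, List.getElem?_eq_getElem (by omega)⟩

-- evaluation lemmas for A's loop body
theorem aStep_none (fm : Option String) (mx : Int) :
    aStep (fm, mx) none = if fm = some "" then (none, mx) else (fm, mx) := by
  unfold aStep; simp

theorem aStep_sent {s : String} (h : s = "N/A" ∨ s = "CT_not_found") (fm : Option String) (mx : Int) :
    aStep (fm, mx) (some s) = if fm = some "" then (some s, mx) else (fm, mx) := by
  unfold aStep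
  rcases h with h | h <;> subst h <;> simp

theorem aStep_str {s : String} {c : Char} (h1 : s ≠ "N/A") (h2 : s ≠ "CT_not_found")
    (hc : PySem.Str.pyGet? s (-1) = some c) (fm : Option String) (mx : Int) :
    aStep (fm, mx) (some s) =
      if c < '6' ∧ '1' ≤ c then
        if pyDigit c > mx then (some s, pyDigit c) else (fm, mx)
      else (fm, mx) := by
  unfold aStep
  rw [if_pos (by simp [h1, h2])]
  simp only [pyGet?_last, hc]

-- evaluation lemmas for B's comprehension filter
theorem pvIsCand_sent {s : String} (h : s = "N/A" ∨ s = "CT_not_found") :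
    pvIsCand (some s) = none := by
  rcases h with h | h <;> subst h <;> decide

theorem pvIsCand_cand {s : String} {c : Char} (h1 : s ≠ "N/A") (h2 : s ≠ "CT_not_found")
    (hc : PySem.Str.pyGet? s (-1) = some c) (hd : '1' ≤ c ∧ c ≤ '5') :
    pvIsCand (some s) = some s := by
  simp only [pvIsCand, hc]
  simp [h1, h2, hd.1, hd.2]

theorem pvIsCand_noncand {s : String} {c : Char}
    (hc : PySem.Str.pyGet? s (-1) = some c) (hd : ¬ ('1' ≤ c ∧ c ≤ '5')) :
    pvIsCand (some s) = none := by
  simp only [pvIsCand, hc]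
  rw [if_neg (by intro ⟨_, _, h3, h4⟩; exact hd ⟨h3, h4⟩)]

theorem pvKey_of_get {s : String} {c : Char} (hc : PySem.Str.pyGet? s (-1) = some c) :
    pvKey s = pyDigit c := by
  unfold pvKey
  rw [hc]
  rfl

theorem cand_key_pos {s : String} {l : List (Option String)}
    (h : s ∈ l.filterMap pvIsCand) : 1 ≤ pvKey s := by
  rw [List.mem_filterMap] at h
  obtain ⟨p, _, hp⟩ := h
  rcases p with _ | t
  · rw [show pvIsCand none = none from rfl] at hp
    cases hp
  · rcases hg : PySem.Str.pyGet? t (-1) with _ | c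
    · simp only [pvIsCand, hg] at hp
      cases hp
    · simp only [pvIsCand, hg] at hp
      by_cases hcond : t ≠ "N/A" ∧ t ≠ "CT_not_found" ∧ '1' ≤ c ∧ c ≤ '5'
      · rw [if_pos hcond] at hp
        cases hp
        rw [pvKey_of_get hg]
        have := char_one_le_toNat hcond.2.2.1
        unfold pyDigit
        omega
      · rw [if_neg hcond] at hp
        simp at hp

-- A's fold from an arbitrary non-'' state, characterised
theorem foldA_char (l : List (Option String)) :
    ∀ (fm : Option String) (mx : Int), some "" ∉ l → fm ≠ some "" →
    (l.foldl aStep (fm, mx)).1 =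
    match fmAux mx (l.filterMap pvIsCand) with
    | some r => some r
    | none => fm := by
  induction l with
  | nil => intro fm mx _ _; simp [fmAux]
  | cons p t ih =>
    intro fm mx hne hfm
    have hne' : some "" ∉ t := fun h => hne (List.mem_cons_of_mem _ h)
    rcases p with _ | s
    · rw [List.foldl_cons, aStep_none, if_neg hfm]
      simp only [List.filterMap_cons, pvIsCand]
      exact ih fm mx hne' hfm
    · have hs : s ≠ "" := by intro h; subst h; exact hne (by simp)
      by_cases hsent : s = "N/A" ∨ s = "CT_not_found"
      · rw [List.foldl_cons, aStep_sent hsent, if_neg hfm]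
        simp only [List.filterMap_cons, pvIsCand_sent hsent]
        exact ih fm mx hne' hfm
      · push_neg at hsent
        obtain ⟨h1, h2⟩ := hsent
        obtain ⟨c, hc⟩ := pyGet?_ne_none hs
        rw [List.foldl_cons, aStep_str h1 h2 hc]
        simp only [List.filterMap_cons]
        by_cases hdig : '1' ≤ c ∧ c ≤ '5'
        · rw [pvIsCand_cand h1 h2 hc hdig]
          rw [if_pos ⟨char_le_lt6 hdig.2, hdig.1⟩]
          by_cases hgt : pyDigit c > mx
          · rw [if_pos hgt, ih (some s) (pyDigit c) hne' (by simp [hs])]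
            simp only [fmAux, pvKey_of_get hc]
            rw [if_pos hgt]
            rcases fmAux (pyDigit c) (t.filterMap pvIsCand) with _ | r <;> simp
          · rw [if_neg hgt, ih fm mx hne' hfm]
            simp only [fmAux, pvKey_of_get hc]
            rw [if_neg hgt]
        · rw [pvIsCand_noncand hc hdig]
          rw [if_neg (fun h => hdig ⟨h.2, char_lt6_le h.1⟩)]
          exact ih fm mx hne' hfm

-- A's fold from the initial state '' (the first sentinel, if any, takes found_max's place)
theorem foldA_init (l : List (Option String)) (h : some "" ∉ l) :
    find_max_phase l =
    match fmAux 0 (l.filterMap pvIsCand) with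
    | some r => some r
    | none =>
      match l.find? pvIsSent with
      | some p => p
      | none => some "" := by
  unfold find_max_phase
  induction l with
  | nil => simp [fmAux]
  | cons p t ih =>
    have hne' : some "" ∉ t := fun hm => h (List.mem_cons_of_mem _ hm)
    rcases p with _ | s
    · rw [List.foldl_cons, aStep_none, if_pos rfl]
      rw [foldA_char t none 0 hne' (by simp)]
      simp only [List.filterMap_cons, List.find?_cons]
      have hsnt : pvIsSent none = true := by simp [pvIsSent]
      simp [pvIsCand, hsnt]
    · have hs : s ≠ "" := by intro he; subst he; exact h (by simp)
      by_cases hsent : s = "N/A" ∨ s = "CT_not_found"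
      · rw [List.foldl_cons, aStep_sent hsent, if_pos rfl]
        rw [foldA_char t (some s) 0 hne' (by simp [hs])]
        have hsnt : pvIsSent (some s) = true := by
          unfold pvIsSent; rcases hsent with h' | h' <;> simp [h']
        simp only [List.filterMap_cons, pvIsCand_sent hsent, List.find?_cons, hsnt]
      · push_neg at hsent
        obtain ⟨h1, h2⟩ := hsent
        obtain ⟨c, hc⟩ := pyGet?_ne_none hs
        have hsnt : pvIsSent (some s) = false := by unfold pvIsSent; simp [h1, h2]
        rw [List.foldl_cons, aStep_str h1 h2 hc]
        by_cases hdig : '1' ≤ c ∧ c ≤ '5'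
        · rw [if_pos ⟨char_le_lt6 hdig.2, hdig.1⟩]
          have hgt : pyDigit c > 0 := by
            have := char_one_le_toNat hdig.1; unfold pyDigit; omega
          rw [if_pos hgt]
          rw [foldA_char t (some s) (pyDigit c) hne' (by simp [hs])]
          simp only [List.filterMap_cons, pvIsCand_cand h1 h2 hc hdig]
          simp only [fmAux, pvKey_of_get hc]
          rw [if_pos hgt]
          rcases fmAux (pyDigit c) (t.filterMap pvIsCand) with _ | r <;> simp
        · rw [if_neg (fun h' => hdig ⟨h'.2, char_lt6_le h'.1⟩)]
          rw [ih hne']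
          simp only [List.filterMap_cons, pvIsCand_noncand hc hdig, List.find?_cons, hsnt]

-- Python max with key (first maximum) equals the running-threshold scan fmAux
theorem max?_cons_fm (cs : List String) :
    ∀ m : String, PySem.List.max? (m :: cs) pvKey =
      match fmAux (pvKey m) cs with
      | some r => some r
      | none => some m := by
  induction cs with
  | nil => intro m; simp [PySem.List.max?, fmAux]
  | cons c t ih =>
    intro m
    have hstep : PySem.List.max? (m :: c :: t) pvKey =
        PySem.List.max? ((if pvKey m < pvKey c then c else m) :: t) pvKey := by
      by_cases h : pvKey m < pvKey c <;> simp [PySem.List.max?, h]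
    rw [hstep]
    by_cases h : pvKey m < pvKey c
    · rw [if_pos h, ih c]
      simp only [fmAux]
      rw [if_pos h]
      rcases fmAux (pvKey c) t with _ | r <;> simp
    · rw [if_neg h, ih m]
      simp only [fmAux]
      rw [if_neg h]

theorem alt_char (l : List (Option String)) :
    find_max_phase_alt l =
    match fmAux 0 (l.filterMap pvIsCand) with
    | some r => some r
    | none =>
      match l.find? pvIsSent with
      | some p => p
      | none => some "" := by
  unfold find_max_phase_alt
  rcases hcs : l.filterMap pvIsCand with _ | ⟨c, t⟩
  · simp [PySem.List.max?, fmAux]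
  · have hc1 : 1 ≤ pvKey c := cand_key_pos (l := l) (by rw [hcs]; simp)
    rw [max?_cons_fm]
    simp only [fmAux]
    rw [if_pos (by omega : (0:Int) < pvKey c)]

-- ===== VERDICT (by name: the statement is the Claim_ definition above) =====
theorem find_max_phase_spec : Claim_equal_find_max_phase := by
  intro l _ hpre
  unfold Spec_find_max_phase
  rw [foldA_init l hpre, alt_char l]
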